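-- pv_equiv track=rewrite | github.com/dhruva8405/Tender-Trace | lambdas/auto_investigator/lambda_function.py | rule_political_link
-- ===== SOURCE A (Python) =====
-- def safe_str(value):
--     if value is None:
--         return ""
--     return str(value).strip()
--
-- def rule_political_link(company, directors, politicians):
--     """Rule 4: Director matched to politician family declaration."""
--     cid = safe_str(company["company_id"])
--     my_dins = {safe_str(d.get("din")) for d in directors if safe_str(d.get("company_id")) == cid and safe_str(d.get("din"))}
--     my_dins.discard("")
--     links = [p for p in politicians if safe_str(p.get("related_din")) in my_dins and my_dins]
--     if not links:
--         return False, None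
--     p = links[0]
--     return True, f"Director declared as {safe_str(p.get('relation'))} of {safe_str(p.get('name'))} ({safe_str(p.get('party'))}, {safe_str(p.get('constituency'))})"
-- ===== SOURCE B (Python) =====
-- def safe_str(value):
--     if value is None:
--         return ""
--     return str(value).strip()
--
-- def rule_political_link(company, directors, politicians):
--     """Rule 4: Director matched to politician family declaration."""
--     cid = safe_str(company["company_id"])
--     for p in politicians:
--         rdin = safe_str(p.get("related_din"))
--         if rdin and any(safe_str(d.get("company_id")) == cid and safe_str(d.get("din")) == rdin
--                         for d in directors):
--             return True, f"Director declared as {safe_str(p.get('relation'))} of {safe_str(p.get('name'))} ({safe_str(p.get('party'))}, {safe_str(p.get('constituency'))})"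
--     return False, None
-- ===== Notes on version B (the rewrite author's own statement) =====
-- stated objective: alternative
-- what changed: Replaces the build-a-DIN-set-then-filter-all-politicians strategy with a single early-returning loop over politicians that scans directors directly for a matching DIN, returning at the first hit.
import Mathlib
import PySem

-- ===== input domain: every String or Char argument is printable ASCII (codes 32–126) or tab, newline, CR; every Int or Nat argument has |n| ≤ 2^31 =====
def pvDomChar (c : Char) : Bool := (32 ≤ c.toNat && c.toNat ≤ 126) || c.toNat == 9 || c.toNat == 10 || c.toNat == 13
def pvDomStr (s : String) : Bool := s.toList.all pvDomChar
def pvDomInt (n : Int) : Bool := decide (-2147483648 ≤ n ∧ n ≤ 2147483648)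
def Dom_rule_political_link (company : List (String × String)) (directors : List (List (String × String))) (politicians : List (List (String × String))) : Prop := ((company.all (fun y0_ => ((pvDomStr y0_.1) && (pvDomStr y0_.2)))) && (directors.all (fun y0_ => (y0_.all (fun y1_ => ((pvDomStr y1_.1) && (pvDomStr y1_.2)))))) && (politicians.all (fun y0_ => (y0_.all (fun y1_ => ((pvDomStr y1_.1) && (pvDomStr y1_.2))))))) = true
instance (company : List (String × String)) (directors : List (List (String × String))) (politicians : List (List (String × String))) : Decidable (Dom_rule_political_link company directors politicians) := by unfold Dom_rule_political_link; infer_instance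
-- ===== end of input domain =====

-- B scans politicians in order and, per politician, scans directors directly for a matching
-- DIN, returning at the first hit; A instead precomputes the set of matching DINs and filters
-- all politicians. Equivalence is about the return value; neither mutates its arguments.

-- shared primitives: d.get(k) on an insertion-ordered dict (first match) and safe_str
def pvLookup (d : List (String × String)) (k : String) : Option String :=
  (d.find? (fun p => p.1 == k)).map (·.2)

def pvSafe (o : Option String) : String := PySem.Str.strip (o.getD "")

-- the f-string both programs return for a matched politician p
def pvMsg (p : List (String × String)) : String :=
  "Director declared as " ++ pvSafe (pvLookup p "relation") ++ " of " ++
  pvSafe (pvLookup p "name") ++ " (" ++ pvSafe (pvLookup p "party") ++ ", " ++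
  pvSafe (pvLookup p "constituency") ++ ")"

-- ===== PORT A =====
def rule_political_link (company : List (String × String)) (directors : List (List (String × String))) (politicians : List (List (String × String))) : Bool × Option String :=
  let cid := pvSafe (pvLookup company "company_id")
  let myDins0 : PySem.Set String :=
    PySem.Set.ofList ((directors.filter (fun d =>
      pvSafe (pvLookup d "company_id") == cid && pvSafe (pvLookup d "din") != "")).map
      (fun d => pvSafe (pvLookup d "din")))
  let myDins := PySem.Set.discard myDins0 ""
  let links := politicians.filter (fun p =>
    PySem.Set.contains myDins (pvSafe (pvLookup p "related_din")) && !(PySem.Set.len myDins == 0))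
  match links with
  | [] => (false, none)
  | p :: _ => (true, some (pvMsg p))

-- ===== PORT B =====
def pvDirMatch (directors : List (List (String × String))) (cid rdin : String) : Bool :=
  directors.any (fun d =>
    pvSafe (pvLookup d "company_id") == cid && pvSafe (pvLookup d "din") == rdin)

def pvScan (directors : List (List (String × String))) (cid : String) :
    List (List (String × String)) → Bool × Option String
  | [] => (false, none)
  | p :: rest =>
    let rdin := pvSafe (pvLookup p "related_din")
    if rdin != "" && pvDirMatch directors cid rdin then (true, some (pvMsg p))
    else pvScan directors cid rest

def rule_political_link_alt (company : List (String × String)) (directors : List (List (String × String))) (politicians : List (List (String × String))) : Bool × Option String :=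
  pvScan directors (pvSafe (pvLookup company "company_id")) politicians

-- ===== PRECONDITION & SPEC =====
-- Pre_ excludes exactly the inputs where company lacks the key "company_id", on which
-- the Python A (and B) raises KeyError.
def Pre_rule_political_link (company : List (String × String)) (directors : List (List (String × String))) (politicians : List (List (String × String))) : Prop :=
  "company_id" ∈ company.map Prod.fst

instance (company : List (String × String)) (directors : List (List (String × String))) (politicians : List (List (String × String))) : Decidable (Pre_rule_political_link company directors politicians) := by unfold Pre_rule_political_link; infer_instance

def pvWitness_rule_political_link : (List (String × String)) × (List (List (String × String))) × (List (List (String × String))) :=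
  ([("company_id", "C1")], [[("company_id", "C1"), ("din", "D7")]], [[("related_din", "D7"), ("name", "N")]])

def Spec_rule_political_link (company : List (String × String)) (directors : List (List (String × String))) (politicians : List (List (String × String))) (out : Bool × Option String) : Prop := out = rule_political_link_alt company directors politicians
instance (company : List (String × String)) (directors : List (List (String × String))) (politicians : List (List (String × String))) (out : Bool × Option String) : Decidable (Spec_rule_political_link company directors politicians out) := by unfold Spec_rule_political_link; infer_instance

-- ===== CLAIM (what is proved, stated in full; the proofs are below) =====
def Claim_equal_rule_political_link : Prop := ∀ (company : List (String × String)) (directors : List (List (String × String))) (politicians : List (List (String × String))), Dom_rule_political_link company directors politicians → Pre_rule_political_link company directors politicians → Spec_rule_political_link company directors politicians (rule_political_link company directors politicians)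

-- ===== LEMMAS AND PROOFS =====

-- membership in A's DIN set is exactly B's per-politician test
theorem contains_myDins (directors : List (List (String × String))) (cid r : String) :
    PySem.Set.contains
      (PySem.Set.discard
        (PySem.Set.ofList ((directors.filter (fun d =>
          pvSafe (pvLookup d "company_id") == cid && pvSafe (pvLookup d "din") != "")).map
          (fun d => pvSafe (pvLookup d "din")))) "") r
    = (r != "" && pvDirMatch directors cid r) := by
  rcases h : (r != "" && pvDirMatch directors cid r) with _ | _
  · rw [Bool.eq_false_iff, Ne, PySem.Set.contains_iff, PySem.Set.mem_discard,
      PySem.Set.mem_ofList, List.mem_map]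
    rintro ⟨⟨d, hd, rfl⟩, hne⟩
    rw [List.mem_filter, Bool.and_eq_true, beq_iff_eq, bne_iff_ne] at hd
    rw [Bool.and_eq_false_iff] at h
    rcases h with h | h
    · rw [bne_eq_false_iff_eq] at h; exact hne h
    · rw [Bool.eq_false_iff] at h
      exact h (by
        rw [pvDirMatch, List.any_eq_true]
        exact ⟨d, hd.1, by
          rw [Bool.and_eq_true, beq_iff_eq, beq_iff_eq]; exact ⟨hd.2.1, rfl⟩⟩)
  · rw [Bool.and_eq_true, bne_iff_ne, Ne] at h
    obtain ⟨hne, hm⟩ := h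
    rw [pvDirMatch, List.any_eq_true] at hm
    obtain ⟨d, hd, hcond⟩ := hm
    rw [Bool.and_eq_true, beq_iff_eq, beq_iff_eq] at hcond
    rw [PySem.Set.contains_iff, PySem.Set.mem_discard, PySem.Set.mem_ofList, List.mem_map]
    refine ⟨⟨d, ?_, hcond.2⟩, fun h => hne (hcond.2 ▸ h)⟩
    rw [List.mem_filter, Bool.and_eq_true, beq_iff_eq, bne_iff_ne]
    exact ⟨hd, hcond.1, hcond.2 ▸ fun h => hne h⟩

theorem len_ne_zero_of_contains {s : PySem.Set String} {r : String}
    (h : PySem.Set.contains s r = true) : (PySem.Set.len s == 0) = false := by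
  rw [PySem.Set.contains_iff] at h
  cases s with
  | nil => cases h
  | cons x xs =>
    simp only [PySem.Set.len, List.length_cons]
    simp only [beq_eq_false_iff_ne, Ne]
    omega

theorem filter_eq_scan (directors : List (List (String × String))) (cid : String)
    (S : PySem.Set String)
    (hS : ∀ r, PySem.Set.contains S r = (r != "" && pvDirMatch directors cid r)) :
    ∀ ps : List (List (String × String)),
      (match ps.filter (fun p =>
          PySem.Set.contains S (pvSafe (pvLookup p "related_din")) && !(PySem.Set.len S == 0)) with
        | [] => ((false : Bool), (none : Option String))
        | p :: _ => (true, some (pvMsg p)))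
      = pvScan directors cid ps := by
  intro ps
  induction ps with
  | nil => rfl
  | cons p rest ih =>
    rw [pvScan, List.filter_cons]
    have hc : (PySem.Set.contains S (pvSafe (pvLookup p "related_din")) && !(PySem.Set.len S == 0))
        = (pvSafe (pvLookup p "related_din") != "" &&
            pvDirMatch directors cid (pvSafe (pvLookup p "related_din"))) := by
      rcases h : (pvSafe (pvLookup p "related_din") != "" &&
          pvDirMatch directors cid (pvSafe (pvLookup p "related_din"))) with _ | _
      · rw [hS, h]; simp
      · rw [hS, h, len_ne_zero_of_contains (s := S) (by rw [hS, h])]; simp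
    rw [hc]
    cases h : (pvSafe (pvLookup p "related_din") != "" &&
        pvDirMatch directors cid (pvSafe (pvLookup p "related_din"))) with
    | false => simpa using ih
    | true => simp

-- ===== VERDICT (by name: the statement is the Claim_ definition above) =====
theorem rule_political_link_spec : Claim_equal_rule_political_link := by
  intro company directors politicians _ _
  show rule_political_link company directors politicians
      = rule_political_link_alt company directors politicians
  rw [rule_political_link, rule_political_link_alt]
  exact filter_eq_scan directors _ _ (contains_myDins directors _) politicians
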